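-- pv_equiv track=rewrite | github.com/juancruzmoran/pygameGP8 | funcionesVACIAS.py | puntos
-- ===== SOURCE A (Python) =====
-- def puntos(candidata):
--
--     if len(candidata)==3:
--         return(1)
--     if len(candidata)==4:
--         return(2)
--     if len(candidata)==5 or len(candidata)==6:
--         i=1
--         for i in range(len(candidata)):
--             i=i+1
--         return(i)
--     if len(candidata)==7:
--         return(10)
--     else:
--         return(-1)
-- ===== SOURCE B (Python) =====
-- def puntos(candidata):
--     # Single pass over the characters: keep a running count k and the score
--     # the word would have if it ended here; never calls len().
--     score = -1
--     k = 0
--     for _ in candidata: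
--         k += 1
--         if k == 3:
--             score = 1
--         elif k == 4:
--             score = 2
--         elif k == 5 or k == 6:
--             score = k
--         elif k == 7:
--             score = 10
--         else:
--             score = -1
--     return score
-- ===== Notes on version B (the rewrite author's own statement) =====
-- stated objective: alternative
-- what changed: Replaces the len()-based if-cascade (with its degenerate length-recomputing loop) by a single streaming pass over the characters that maintains a running count and the score the word would have if it ended at the current character; trades A's O(1) len() dispatch for an O(n) scan.
import Mathlib
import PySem

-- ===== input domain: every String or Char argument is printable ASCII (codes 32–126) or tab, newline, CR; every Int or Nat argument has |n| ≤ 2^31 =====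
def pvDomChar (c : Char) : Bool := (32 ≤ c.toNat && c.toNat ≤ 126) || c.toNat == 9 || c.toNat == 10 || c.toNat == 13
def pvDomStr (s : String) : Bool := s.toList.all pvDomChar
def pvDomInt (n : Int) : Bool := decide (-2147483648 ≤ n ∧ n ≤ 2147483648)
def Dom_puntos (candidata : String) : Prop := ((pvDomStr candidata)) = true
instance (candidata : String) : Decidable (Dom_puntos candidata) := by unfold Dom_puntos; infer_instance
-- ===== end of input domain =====

-- ===== PORT A =====
-- A's if-cascade; Python calls len(candidata) at each branch; the 5/6 branch is
-- the loop 'i=1; for i in range(len(candidata)): i=i+1; return i'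
def puntos (candidata : String) : Int :=
  if PySem.Str.len candidata == 3 then 1
  else if PySem.Str.len candidata == 4 then 2
  else if PySem.Str.len candidata == 5 || PySem.Str.len candidata == 6 then
    (PySem.List.pyRange 0 (PySem.Str.len candidata) 1).foldl (fun _acc i => i + 1) 1
  else if PySem.Str.len candidata == 7 then 10
  else -1

-- ===== PORT B =====
-- B: one streaming pass over the characters, maintaining (running count k, current score)
def pvScore (k : Int) : Int :=
  if k == 3 then 1
  else if k == 4 then 2
  else if k == 5 || k == 6 then k
  else if k == 7 then 10
  else -1

def pvStep (st : Int × Int) (_c : Char) : Int × Int :=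
  let k := st.1 + 1
  (k, pvScore k)

def puntos_alt (candidata : String) : Int :=
  (candidata.toList.foldl pvStep (0, -1)).2

-- ===== PRECONDITION & SPEC =====
def Spec_puntos (candidata : String) (out : Int) : Prop := out = puntos_alt candidata
instance (candidata : String) (out : Int) : Decidable (Spec_puntos candidata out) := by unfold Spec_puntos; infer_instance

-- ===== CLAIM (what is proved, stated in full; the proofs are below) =====
def Claim_equal_puntos : Prop := ∀ (candidata : String), Dom_puntos candidata → Spec_puntos candidata (puntos candidata)

-- ===== LEMMAS AND PROOFS =====
theorem pvFold_spec (l : List Char) (k s : Int) (h : l ≠ []) :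
    l.foldl pvStep (k, s) = (k + l.length, pvScore (k + l.length)) := by
  induction l generalizing k s with
  | nil => exact absurd rfl h
  | cons c t ih =>
    cases t with
    | nil => simp [pvStep]
    | cons d u =>
      rw [List.foldl_cons]
      show List.foldl pvStep (k + 1, pvScore (k + 1)) (d :: u) = _
      have hlen : (k + 1) + (((d :: u).length : Nat) : Int)
          = k + (((c :: d :: u).length : Nat) : Int) := by simp only [List.length_cons]; push_cast; ring
      rw [ih (k + 1) (pvScore (k + 1)) (by simp), hlen]

-- ===== VERDICT (by name: the statement is the Claim_ definition above) =====
theorem puntos_spec : Claim_equal_puntos := by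
  intro s _
  unfold Spec_puntos puntos puntos_alt
  rw [PySem.Str.len_eq]
  generalize s.toList = l
  cases l with
  | nil => decide
  | cons c t =>
    rw [pvFold_spec _ _ _ (by simp)]
    have h0 : (0 : Int) + (((c :: t).length : Nat) : Int) = ((c :: t).length : Nat) := by ring
    rw [h0]
    dsimp only
    have h1 : 1 ≤ (c :: t).length := by simp
    generalize (c :: t).length = m at h1 ⊢
    rcases (show m = 1 ∨ m = 2 ∨ m = 3 ∨ m = 4 ∨ m = 5 ∨ m = 6 ∨ m = 7 ∨ 8 ≤ m by omega)
      with h | h | h | h | h | h | h | h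
    · subst h; decide
    · subst h; decide
    · subst h; decide
    · subst h; decide
    · subst h; decide
    · subst h; decide
    · subst h; decide
    · have e3 : (((m : Nat) : Int) == 3) = false := by simp; omega
      have e4 : (((m : Nat) : Int) == 4) = false := by simp; omega
      have e5 : (((m : Nat) : Int) == 5) = false := by simp; omega
      have e6 : (((m : Nat) : Int) == 6) = false := by simp; omega
      have e7 : (((m : Nat) : Int) == 7) = false := by simp; omega
      simp [pvScore, e3, e4, e5, e6, e7]
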